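-- pv_equiv track=rewrite | github.com/esambrailo/projects | 8) Object Oriented Programming/.ipynb_checkpoints/wordscore-checkpoint.py | words_possible
-- ===== SOURCE A (Python) =====
-- def words_possible(rack, wildcard_count, word_dataset):
--     '''Function returns all possible words for a given rack with wildcards.
--     Iterating through all the words in a dataset, and confirming if each rack letter exists in the scrabble rack.
--     If a letter is not in the rack, any wildcards availabe are used until depleted. All wildcard letters are stored in return.'''
--     words = [] #list that will hold all possible words, and the letters covered by wildcards in that word
--     for word in word_dataset:
--         letter_list = rack.copy() #temp variable to reset rack values for each iteration
--         wildcards = wildcard_count #temp variable to reset wildcard_count value for each iteration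
--         word_in = True #boolean for whether a word works. default is true unless proven false.
--         wild_letters = [] #temp holder for letters used by wildcard
--         for letter in word:
--             if letter in letter_list: #confirming a letter match and removing it from available letters for future iteration
--                 letter_list.remove(letter)
--             elif wildcards > 0: #using and depleting wildcards available, storing letter used by wildcard
--                 wildcards -= 1
--                 wild_letters.append(letter)
--             else: #setting word match as false and breaking iteration for given word
--                 word_in = False
--                 break
--         if word_in: #for all word matches, appending nested list with the word and wildcard letters
--             words.append([word, ''.join(wild_letters)])
--     return words
-- ===== SOURCE B (Python) =====
-- def words_possible(rack, wildcard_count, word_dataset):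
--     '''Stateless characterization: an occurrence of a letter in a word is covered by a
--     wildcard exactly when its multiplicity within the prefix up to and including it
--     exceeds the rack's supply of that letter; a word is playable iff the number of
--     such occurrences fits in the wildcard budget.  No rack copy, no consumption
--     state, no break -- playability and the wild letters fall out of one comprehension.'''
--     budget = max(wildcard_count, 0)
--     results = []
--     for word in word_dataset:
--         letters = list(word)
--         wild = [ch for i, ch in enumerate(letters)
--                 if letters[:i + 1].count(ch) > rack.count(ch)]
--         if len(wild) <= budget:
--             results.append([word, ''.join(wild)])
--     return results
-- ===== Notes on version B (the rewrite author's own statement) =====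
-- stated objective: alternative
-- what changed: Replaces A's stateful greedy scan (rack copy, remove, wildcard decrement, early break) by a stateless characterization: an occurrence is a wildcard letter iff its prefix multiplicity exceeds the rack's count of that letter, collected by one comprehension and compared against the budget.
import Mathlib
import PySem

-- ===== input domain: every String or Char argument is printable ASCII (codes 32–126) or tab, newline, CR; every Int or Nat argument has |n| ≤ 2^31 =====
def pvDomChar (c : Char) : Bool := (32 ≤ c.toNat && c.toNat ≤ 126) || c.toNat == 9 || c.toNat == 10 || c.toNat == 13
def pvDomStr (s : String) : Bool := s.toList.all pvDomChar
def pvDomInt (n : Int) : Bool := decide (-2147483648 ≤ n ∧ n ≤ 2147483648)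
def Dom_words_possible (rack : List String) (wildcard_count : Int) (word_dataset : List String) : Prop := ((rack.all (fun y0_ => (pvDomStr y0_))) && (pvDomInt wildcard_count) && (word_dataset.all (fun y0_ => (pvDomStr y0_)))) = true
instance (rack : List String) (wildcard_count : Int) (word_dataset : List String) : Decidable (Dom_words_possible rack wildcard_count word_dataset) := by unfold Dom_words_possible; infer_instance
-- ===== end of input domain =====

-- B replaces A's stateful greedy scan (rack copy / remove / wildcard decrement / break)
-- by a stateless per-occurrence characterization via prefix counts (objective: alternative).

-- a word letter as the 1-character string Python compares against the rack tiles
def chKey (c : Char) : String := String.ofList [c]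

-- ===== PORT A =====
-- inner 'for letter in word' loop of A: state (letter_list, wildcards, wild_letters);
-- returns none when the 'else: word_in = False; break' branch fires
def wpWordA : List Char → List String → Int → Option (List Char)
  | [], _, _ => some []
  | c :: rest, letter_list, wildcards =>
    if chKey c ∈ letter_list then
      match PySem.List.remove? letter_list (chKey c) with
      | some ll' => wpWordA rest ll' wildcards
      | none => none   -- unreachable: membership was just confirmed
    else if wildcards > 0 then
      (wpWordA rest letter_list (wildcards - 1)).map (c :: ·)
    else none

def words_possible (rack : List String) (wildcard_count : Int) (word_dataset : List String) : List (List String) :=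
  word_dataset.foldl (fun words word =>
    match wpWordA word.toList rack wildcard_count with
    | some wild_letters => words ++ [[word, String.ofList wild_letters]]
    | none => words) []

-- ===== PORT B =====
-- the comprehension's test for position (i, ch): letters[:i+1].count(ch) > rack.count(ch)
def wpWildTest (rack : List String) (letters : List Char) (p : Int × Char) : Bool :=
  decide (rack.count (chKey p.2) < (PySem.List.slice letters none (some (p.1 + 1))).count p.2)

def words_possible_alt (rack : List String) (wildcard_count : Int) (word_dataset : List String) : List (List String) :=
  let budget := max wildcard_count 0
  word_dataset.foldl (fun results word =>
    let letters := word.toList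
    let wild := ((PySem.List.enumerate letters).filter (wpWildTest rack letters)).map (·.2)
    if (wild.length : Int) ≤ budget then results ++ [[word, String.ofList wild]] else results) []

-- ===== PRECONDITION & SPEC =====
def Spec_words_possible (rack : List String) (wildcard_count : Int) (word_dataset : List String) (out : List (List String)) : Prop := out = words_possible_alt rack wildcard_count word_dataset
instance (rack : List String) (wildcard_count : Int) (word_dataset : List String) (out : List (List String)) : Decidable (Spec_words_possible rack wildcard_count word_dataset out) := by unfold Spec_words_possible; infer_instance

-- ===== CLAIM (what is proved, stated in full; the proofs are below) =====
def Claim_equal_words_possible : Prop := ∀ (rack : List String) (wildcard_count : Int) (word_dataset : List String), Dom_words_possible rack wildcard_count word_dataset → Spec_words_possible rack wildcard_count word_dataset (words_possible rack wildcard_count word_dataset)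

-- ===== LEMMAS AND PROOFS =====

-- proof-only functional description of the wildcard letters of a word:
-- an occurrence is wild iff the rack supply of that letter is already used up by the prefix
def gwild (rack : List String) : List Char → List Char → List Char
  | [], _ => []
  | c :: rest, pref =>
    (if rack.count (chKey c) ≤ pref.count c then [c] else []) ++ gwild rack rest (pref ++ [c])

theorem chKey_inj : Function.Injective chKey := by
  intro a b h
  simpa using String.ofList_inj.mp h

-- B side: the prefix-count comprehension computes gwild
theorem bwild_eq (rack : List String) :
    ∀ (rest pref : List Char),
      ((PySem.List.enumerate rest (pref.length : Int)).filter
          (wpWildTest rack (pref ++ rest))).map (·.2) = gwild rack rest pref := by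
  intro rest
  induction rest with
  | nil => intro pref; simp [gwild, PySem.List.enumerate]
  | cons c rest' ih =>
    intro pref
    rw [PySem.List.enumerate_cons]
    have hslice : PySem.List.slice (pref ++ c :: rest') none (some ((pref.length : Int) + 1))
        = pref ++ [c] := by
      have : ((pref.length : Int) + 1) = ((pref.length + 1 : Nat) : Int) := by push_cast; ring
      rw [this, PySem.List.slice_to_natCast]
      rw [List.take_append]
      simp
    have htest : wpWildTest rack (pref ++ c :: rest') ((pref.length : Int), c)
        = decide (rack.count (chKey c) ≤ pref.count c) := by
      simp only [wpWildTest, hslice]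
      simp [List.count_append]
    have hrec : pref ++ c :: rest' = (pref ++ [c]) ++ rest' := by simp
    have hlen : (pref.length : Int) + 1 = ((pref ++ [c]).length : Nat) := by
      simp
    rw [List.filter_cons, htest]
    by_cases h : rack.count (chKey c) ≤ pref.count c
    · simp only [h, decide_true, if_true, List.map_cons]
      rw [hrec, hlen, ih (pref ++ [c])]
      simp [gwild, h]
    · simp only [h, decide_false, Bool.false_eq_true, if_false]
      rw [hrec, hlen, ih (pref ++ [c])]
      simp [gwild, h]

-- A side: the greedy consume-with-break loop computes gwild, guarded by the budget
theorem greedy_eq (rack : List String) :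
    ∀ (letters : List Char) (ll : List String) (pref : List Char) (w : Int),
      (∀ c : Char, ll.count (chKey c) = rack.count (chKey c) - pref.count c) →
      wpWordA letters ll w
        = if ((gwild rack letters pref).length : Int) ≤ max w 0
            then some (gwild rack letters pref) else none := by
  intro letters
  induction letters with
  | nil =>
    intro ll pref w _
    simp [wpWordA, gwild]
  | cons c rest ih =>
    intro ll pref w H
    by_cases hm : chKey c ∈ ll
    · -- letter available in the rack remainder: not a wildcard letter
      have hpos : 0 < ll.count (chKey c) := List.count_pos_iff.mpr hm
      have hlt : pref.count c < rack.count (chKey c) := by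
        have := H c; omega
      have hrm : PySem.List.remove? ll (chKey c) = some (ll.erase (chKey c)) :=
        PySem.List.remove?_eq_some_erase _ _ hm
      have H' : ∀ d : Char, (ll.erase (chKey c)).count (chKey d)
          = rack.count (chKey d) - (pref ++ [c]).count d := by
        intro d
        have hcnt : (pref ++ [c]).count d = pref.count d + (if d = c then 1 else 0) := by
          by_cases hd : d = c <;> simp [List.count_append, hd, List.count_eq_zero]
        by_cases hd : d = c
        · subst hd
          rw [List.count_erase_self, hcnt, if_pos rfl]
          have := H d
          omega
        · have hk : chKey d ≠ chKey c := fun h => hd (chKey_inj h)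
          rw [List.count_erase_of_ne hk, hcnt, if_neg hd]
          have := H d
          omega
      rw [wpWordA]
      simp only [hm, if_true, hrm]
      rw [ih (ll.erase (chKey c)) (pref ++ [c]) w H']
      have hg : gwild rack (c :: rest) pref = gwild rack rest (pref ++ [c]) := by
        simp [gwild, Nat.not_le.mpr hlt]
      rw [hg]
    · -- letter missing: wildcard (if any) covers it
      have hz : ll.count (chKey c) = 0 := by
        simpa using List.count_eq_zero_of_not_mem hm
      have hge : rack.count (chKey c) ≤ pref.count c := by
        have := H c; omega
      have hg : gwild rack (c :: rest) pref = c :: gwild rack rest (pref ++ [c]) := by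
        simp [gwild, hge]
      have H' : ∀ d : Char, ll.count (chKey d)
          = rack.count (chKey d) - (pref ++ [c]).count d := by
        intro d
        have hcnt : (pref ++ [c]).count d = pref.count d + (if d = c then 1 else 0) := by
          by_cases hd : d = c <;> simp [List.count_append, hd, List.count_eq_zero]
        rw [hcnt]
        by_cases hd : d = c
        · subst hd
          rw [if_pos rfl]
          have := H d
          omega
        · rw [if_neg hd]
          have := H d
          omega
      rw [wpWordA]
      simp only [hm, if_false]
      by_cases hw : w > 0
      · simp only [hw, if_true]
        rw [ih ll (pref ++ [c]) (w - 1) H', hg]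
        by_cases hc : ((gwild rack rest (pref ++ [c])).length : Int) ≤ max (w - 1) 0
        · rw [if_pos hc, if_pos (by simp only [List.length_cons]; push_cast; omega)]
          simp
        · rw [if_neg hc, if_neg (by simp only [List.length_cons]; push_cast; omega)]
          simp
      · simp only [hw, if_false]
        rw [hg, if_neg (by simp only [List.length_cons]; push_cast; omega)]

-- ===== VERDICT (by name: the statement is the Claim_ definition above) =====
theorem words_possible_spec : Claim_equal_words_possible := by
  intro rack wc ds _
  show words_possible rack wc ds = words_possible_alt rack wc ds
  unfold words_possible words_possible_alt
  have hstep : ∀ (acc : List (List String)) (word : String),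
      (match wpWordA word.toList rack wc with
        | some wild_letters => acc ++ [[word, String.ofList wild_letters]]
        | none => acc)
      = (let letters := word.toList
         let wild := ((PySem.List.enumerate letters).filter (wpWildTest rack letters)).map (·.2)
         if (wild.length : Int) ≤ max wc 0 then acc ++ [[word, String.ofList wild]] else acc) := by
    intro acc word
    have hB := bwild_eq rack word.toList []
    simp only [List.length_nil, Nat.cast_zero, List.nil_append] at hB
    have hA := greedy_eq rack word.toList rack [] wc (by intro c; simp)
    simp only [hB, hA]
    split_ifs with h
    · rfl
    · rfl
  suffices h : ∀ (l : List String) (acc : List (List String)),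
      l.foldl (fun words word => match wpWordA word.toList rack wc with
        | some wild_letters => words ++ [[word, String.ofList wild_letters]]
        | none => words) acc
      = l.foldl (fun results word =>
          let letters := word.toList
          let wild := ((PySem.List.enumerate letters).filter (wpWildTest rack letters)).map (·.2)
          if (wild.length : Int) ≤ max wc 0 then results ++ [[word, String.ofList wild]] else results) acc by
    exact h ds []
  intro l
  induction l with
  | nil => intro acc; rfl
  | cons w t ih =>
    intro acc
    simp only [List.foldl_cons]
    rw [hstep acc w]
    exact ih _
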